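-- pv_equiv track=rewrite | github.com/lambdabypi/miniquest-adventure-planner | backend/app/agents/research/query_strategy.py | detect_venue_type
-- ===== SOURCE A (Python) =====
-- from typing import List, Dict, Optional
--
-- def detect_venue_type(venue: Dict) -> str:
--     """
--     Detect the most specific venue type from available information.
--
--     Args:
--         venue: Venue dictionary
--
--     Returns:
--         Detected venue type string
--     """
--     venue_name = venue.get('name', '').lower()
--     venue_type = venue.get('type', '').lower()
--     category = venue.get('category', '').lower()
--
--     # Coffee/Cafe detection
--     coffee_indicators = ['coffee', 'cafe', 'coffeehouse', 'espresso', 'latte']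
--     if (any(indicator in venue_name for indicator in coffee_indicators) or
--         any(indicator in venue_type for indicator in coffee_indicators) or
--         'coffee' in category):
--         return 'coffee_shop'
--
--     # Park/Nature detection
--     park_indicators = ['park', 'pond', 'garden', 'arboretum', 'trail', 'green', 'nature']
--     if (any(indicator in venue_name for indicator in park_indicators) or
--         venue_type in ['park', 'garden', 'nature'] or
--         'park' in category):
--         return 'park'
--
--     # Museum/Gallery detection
--     museum_indicators = ['museum', 'gallery', 'collection', 'exhibit']
--     if (any(indicator in venue_name for indicator in museum_indicators) or
--         venue_type in ['museum', 'gallery'] or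
--         'museum' in category or 'art' in category):
--         return 'museum'
--
--     # Restaurant detection
--     restaurant_indicators = ['restaurant', 'bistro', 'eatery', 'dining', 'grill', 'kitchen']
--     if (any(indicator in venue_name for indicator in restaurant_indicators) or
--         venue_type in ['restaurant', 'dining'] or
--         'food' in category or 'dining' in category):
--         return 'restaurant'
--
--     # Bar/Nightlife detection
--     bar_indicators = ['bar', 'pub', 'brewery', 'tavern', 'lounge']
--     if (any(indicator in venue_name for indicator in bar_indicators) or
--         venue_type in ['bar', 'pub', 'brewery'] or
--         'bar' in category or 'nightlife' in category):
--         return 'bar'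
--
--     # Shopping detection
--     shopping_indicators = ['shop', 'store', 'boutique', 'market', 'mall']
--     if (any(indicator in venue_name for indicator in shopping_indicators) or
--         venue_type in ['shop', 'store', 'retail'] or
--         'shopping' in category):
--         return 'shopping'
--
--     # Default fallback
--     return venue_type or 'attraction'
-- ===== SOURCE B (Python) =====
-- # Flat keyword -> label indices; collect every matching label, then pick by priority.
-- NAME_KEYWORDS = [
--     ('coffee', 'coffee_shop'), ('cafe', 'coffee_shop'), ('coffeehouse', 'coffee_shop'),
--     ('espresso', 'coffee_shop'), ('latte', 'coffee_shop'),
--     ('park', 'park'), ('pond', 'park'), ('garden', 'park'), ('arboretum', 'park'),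
--     ('trail', 'park'), ('green', 'park'), ('nature', 'park'),
--     ('museum', 'museum'), ('gallery', 'museum'), ('collection', 'museum'), ('exhibit', 'museum'),
--     ('restaurant', 'restaurant'), ('bistro', 'restaurant'), ('eatery', 'restaurant'),
--     ('dining', 'restaurant'), ('grill', 'restaurant'), ('kitchen', 'restaurant'),
--     ('bar', 'bar'), ('pub', 'bar'), ('brewery', 'bar'), ('tavern', 'bar'), ('lounge', 'bar'),
--     ('shop', 'shopping'), ('store', 'shopping'), ('boutique', 'shopping'),
--     ('market', 'shopping'), ('mall', 'shopping'),
-- ]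
-- TYPE_SUB_KEYWORDS = [
--     ('coffee', 'coffee_shop'), ('cafe', 'coffee_shop'), ('coffeehouse', 'coffee_shop'),
--     ('espresso', 'coffee_shop'), ('latte', 'coffee_shop'),
-- ]
-- TYPE_EXACT = [
--     ('park', 'park'), ('garden', 'park'), ('nature', 'park'),
--     ('museum', 'museum'), ('gallery', 'museum'),
--     ('restaurant', 'restaurant'), ('dining', 'restaurant'),
--     ('bar', 'bar'), ('pub', 'bar'), ('brewery', 'bar'),
--     ('shop', 'shopping'), ('store', 'shopping'), ('retail', 'shopping'),
-- ]
-- CATEGORY_KEYWORDS = [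
--     ('coffee', 'coffee_shop'), ('park', 'park'),
--     ('museum', 'museum'), ('art', 'museum'),
--     ('food', 'restaurant'), ('dining', 'restaurant'),
--     ('bar', 'bar'), ('nightlife', 'bar'), ('shopping', 'shopping'),
-- ]
-- PRIORITY = ['coffee_shop', 'park', 'museum', 'restaurant', 'bar', 'shopping']
--
--
-- def detect_venue_type(venue):
--     name = venue.get('name', '').lower()
--     vtype = venue.get('type', '').lower()
--     category = venue.get('category', '').lower()
--     matched = ([label for kw, label in NAME_KEYWORDS if kw in name]
--                + [label for kw, label in TYPE_SUB_KEYWORDS if kw in vtype]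
--                + [label for ty, label in TYPE_EXACT if vtype == ty]
--                + [label for kw, label in CATEGORY_KEYWORDS if kw in category])
--     for label in PRIORITY:
--         if label in matched:
--             return label
--     return vtype or 'attraction'
-- ===== Notes on version B (the rewrite author's own statement) =====
-- stated objective: alternative
-- what changed: Instead of six sequential early-return if-blocks, B builds flat keyword->label index lists (name substrings, type substrings, type exact values, category substrings), collects ALL labels whose keywords match into a single list in one pass per field, and then selects the winner by scanning a fixed priority order; the fallback is venue_type or 'attraction' when no label matched.
import Mathlib
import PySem

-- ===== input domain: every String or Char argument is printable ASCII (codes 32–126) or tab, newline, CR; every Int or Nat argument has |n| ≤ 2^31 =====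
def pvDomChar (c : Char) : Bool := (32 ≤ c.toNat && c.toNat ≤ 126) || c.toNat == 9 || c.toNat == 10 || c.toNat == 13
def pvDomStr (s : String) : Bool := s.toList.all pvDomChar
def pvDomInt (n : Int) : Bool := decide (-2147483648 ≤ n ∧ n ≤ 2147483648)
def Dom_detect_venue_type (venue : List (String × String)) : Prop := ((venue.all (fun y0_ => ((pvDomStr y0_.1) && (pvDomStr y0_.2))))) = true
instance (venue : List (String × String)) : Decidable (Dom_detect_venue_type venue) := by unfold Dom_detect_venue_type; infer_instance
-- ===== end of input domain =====

-- B replaces A's six early-return if-blocks by flat keyword->label index lists: it collects ALL matching labels into one list, then selects by a fixed priority order (objective: alternative).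

-- ===== PORT A =====
-- venue.get(k, '') on the association list (first match, '' when absent)
def pvGet (venue : List (String × String)) (k : String) : String :=
  match venue.find? (fun p => p.1 == k) with
  | some p => p.2
  | none => ""

def detect_venue_type (venue : List (String × String)) : String :=
  let venue_name := PySem.Str.lower (pvGet venue "name")
  let venue_type := PySem.Str.lower (pvGet venue "type")
  let category := PySem.Str.lower (pvGet venue "category")
  let coffee_indicators : List String := ["coffee", "cafe", "coffeehouse", "espresso", "latte"]
  if (coffee_indicators.any (fun ind => PySem.Str.isIn ind venue_name)
      || coffee_indicators.any (fun ind => PySem.Str.isIn ind venue_type)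
      || PySem.Str.isIn "coffee" category) then "coffee_shop"
  else
  let park_indicators : List String := ["park", "pond", "garden", "arboretum", "trail", "green", "nature"]
  if (park_indicators.any (fun ind => PySem.Str.isIn ind venue_name)
      || (["park", "garden", "nature"] : List String).contains venue_type
      || PySem.Str.isIn "park" category) then "park"
  else
  let museum_indicators : List String := ["museum", "gallery", "collection", "exhibit"]
  if (museum_indicators.any (fun ind => PySem.Str.isIn ind venue_name)
      || (["museum", "gallery"] : List String).contains venue_type
      || PySem.Str.isIn "museum" category || PySem.Str.isIn "art" category) then "museum"
  else
  let restaurant_indicators : List String := ["restaurant", "bistro", "eatery", "dining", "grill", "kitchen"]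
  if (restaurant_indicators.any (fun ind => PySem.Str.isIn ind venue_name)
      || (["restaurant", "dining"] : List String).contains venue_type
      || PySem.Str.isIn "food" category || PySem.Str.isIn "dining" category) then "restaurant"
  else
  let bar_indicators : List String := ["bar", "pub", "brewery", "tavern", "lounge"]
  if (bar_indicators.any (fun ind => PySem.Str.isIn ind venue_name)
      || (["bar", "pub", "brewery"] : List String).contains venue_type
      || PySem.Str.isIn "bar" category || PySem.Str.isIn "nightlife" category) then "bar"
  else
  let shopping_indicators : List String := ["shop", "store", "boutique", "market", "mall"]
  if (shopping_indicators.any (fun ind => PySem.Str.isIn ind venue_name)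
      || (["shop", "store", "retail"] : List String).contains venue_type
      || PySem.Str.isIn "shopping" category) then "shopping"
  else
  if venue_type = "" then "attraction" else venue_type

-- ===== PORT B =====
def pvNameKw : List (String × String) :=
  [("coffee", "coffee_shop"), ("cafe", "coffee_shop"), ("coffeehouse", "coffee_shop"),
   ("espresso", "coffee_shop"), ("latte", "coffee_shop"),
   ("park", "park"), ("pond", "park"), ("garden", "park"), ("arboretum", "park"),
   ("trail", "park"), ("green", "park"), ("nature", "park"),
   ("museum", "museum"), ("gallery", "museum"), ("collection", "museum"), ("exhibit", "museum"),
   ("restaurant", "restaurant"), ("bistro", "restaurant"), ("eatery", "restaurant"),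
   ("dining", "restaurant"), ("grill", "restaurant"), ("kitchen", "restaurant"),
   ("bar", "bar"), ("pub", "bar"), ("brewery", "bar"), ("tavern", "bar"), ("lounge", "bar"),
   ("shop", "shopping"), ("store", "shopping"), ("boutique", "shopping"),
   ("market", "shopping"), ("mall", "shopping")]

def pvTypeSubKw : List (String × String) :=
  [("coffee", "coffee_shop"), ("cafe", "coffee_shop"), ("coffeehouse", "coffee_shop"),
   ("espresso", "coffee_shop"), ("latte", "coffee_shop")]

def pvTypeExact : List (String × String) :=
  [("park", "park"), ("garden", "park"), ("nature", "park"),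
   ("museum", "museum"), ("gallery", "museum"),
   ("restaurant", "restaurant"), ("dining", "restaurant"),
   ("bar", "bar"), ("pub", "bar"), ("brewery", "bar"),
   ("shop", "shopping"), ("store", "shopping"), ("retail", "shopping")]

def pvCatKw : List (String × String) :=
  [("coffee", "coffee_shop"), ("park", "park"),
   ("museum", "museum"), ("art", "museum"),
   ("food", "restaurant"), ("dining", "restaurant"),
   ("bar", "bar"), ("nightlife", "bar"), ("shopping", "shopping")]

def pvPriority : List String :=
  ["coffee_shop", "park", "museum", "restaurant", "bar", "shopping"]

-- the four comprehensions of Source B, concatenated: every label whose keyword matches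
def pvMatched (name vtype category : String) : List String :=
  ((pvNameKw.filter (fun p => PySem.Str.isIn p.1 name)).map Prod.snd)
  ++ ((pvTypeSubKw.filter (fun p => PySem.Str.isIn p.1 vtype)).map Prod.snd)
  ++ ((pvTypeExact.filter (fun p => vtype == p.1)).map Prod.snd)
  ++ ((pvCatKw.filter (fun p => PySem.Str.isIn p.1 category)).map Prod.snd)

-- the 'for label in PRIORITY' loop of Source B
def pvSelect (vtype : String) (matched : List String) : List String → String
  | [] => if vtype = "" then "attraction" else vtype
  | l :: rest => if matched.contains l then l else pvSelect vtype matched rest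

def detect_venue_type_alt (venue : List (String × String)) : String :=
  let name := PySem.Str.lower (pvGet venue "name")
  let vtype := PySem.Str.lower (pvGet venue "type")
  let category := PySem.Str.lower (pvGet venue "category")
  pvSelect vtype (pvMatched name vtype category) pvPriority

-- ===== PRECONDITION & SPEC =====
def Spec_detect_venue_type (venue : List (String × String)) (out : String) : Prop := out = detect_venue_type_alt venue
instance (venue : List (String × String)) (out : String) : Decidable (Spec_detect_venue_type venue out) := by unfold Spec_detect_venue_type; infer_instance

-- ===== CLAIM (what is proved, stated in full; the proofs are below) =====
def Claim_equal_detect_venue_type : Prop := ∀ (venue : List (String × String)), Dom_detect_venue_type venue → Spec_detect_venue_type venue (detect_venue_type venue)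

-- ===== LEMMAS AND PROOFS =====

-- contains over a filtered-and-projected keyword index = any over the index
theorem pv_contains_filter_map (kws : List (String × String)) (pr : String × String → Bool) (key : String) :
    (((kws.filter pr).map Prod.snd).contains key)
    = kws.any (fun q => pr q && (q.2 == key)) := by
  induction kws with
  | nil => rfl
  | cons q rest ih =>
    by_cases h : pr q = true
    · simp only [List.filter_cons, h, if_pos, List.map_cons, List.contains_cons,
        List.any_cons, ih, Bool.true_and, Bool.beq_comm]
    · rw [Bool.not_eq_true] at h
      simp only [List.filter_cons, h, Bool.false_eq_true, if_false, List.any_cons,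
        Bool.false_and, Bool.false_or, ih]

-- ===== VERDICT (by name: the statement is the Claim_ definition above) =====
set_option maxHeartbeats 1000000 in
theorem detect_venue_type_spec : Claim_equal_detect_venue_type := by
  intro venue _
  unfold Spec_detect_venue_type detect_venue_type detect_venue_type_alt
  generalize PySem.Str.lower (pvGet venue "name") = n
  generalize PySem.Str.lower (pvGet venue "type") = t
  generalize PySem.Str.lower (pvGet venue "category") = c
  simp only [pvSelect, pvPriority, pvMatched, List.contains_append,
    pv_contains_filter_map, pvNameKw, pvTypeSubKw, pvTypeExact, pvCatKw,
    List.any_cons, List.any_nil, List.contains_cons, List.contains_nil]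
  simp only [String.reduceBEq, Bool.and_true, Bool.and_false, Bool.or_false,
    Bool.false_or, Bool.or_assoc]
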